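-- pv_equiv track=rewrite | github.com/JaimyWal/KNMIproject | RegionalTrends/Outdated/TemporalOnly.py | get_expanded_sources
-- ===== SOURCE A (Python) =====
-- def get_expanded_sources(source_list, station_list, station_sources):
--     """Expand 'Stations' in source_list to actual station names, return (expanded, has_stations)."""
--     expanded = []
--     has_stations = False
--     for src in (source_list or []):
--         if src == 'Stations':
--             has_stations = True
--             expanded.extend(station_list or [])
--         else:
--             expanded.append(src)
--     return expanded, has_stations
-- ===== SOURCE B (Python) =====
-- def get_expanded_sources(source_list, station_list, station_sources):
--     """Split source_list into segments at each 'Stations' marker, then join the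
--     segments with station_list as separator; has_stations iff more than one segment."""
--     segments = [[]]
--     for s in (source_list or []):
--         if s == 'Stations':
--             segments.append([])
--         else:
--             segments[-1].append(s)
--     expanded = list(segments[0])
--     for seg in segments[1:]:
--         expanded += list(station_list or []) + seg
--     return expanded, len(segments) > 1
-- ===== Notes on version B (the rewrite author's own statement) =====
-- stated objective: alternative
-- what changed: Replaces A's single stateful accumulate-as-you-go loop with a split/join algorithm: recursively split source_list into segments at each 'Stations' marker, join the segments with station_list as separator, and derive has_stations from the segment count.
import Mathlib
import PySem

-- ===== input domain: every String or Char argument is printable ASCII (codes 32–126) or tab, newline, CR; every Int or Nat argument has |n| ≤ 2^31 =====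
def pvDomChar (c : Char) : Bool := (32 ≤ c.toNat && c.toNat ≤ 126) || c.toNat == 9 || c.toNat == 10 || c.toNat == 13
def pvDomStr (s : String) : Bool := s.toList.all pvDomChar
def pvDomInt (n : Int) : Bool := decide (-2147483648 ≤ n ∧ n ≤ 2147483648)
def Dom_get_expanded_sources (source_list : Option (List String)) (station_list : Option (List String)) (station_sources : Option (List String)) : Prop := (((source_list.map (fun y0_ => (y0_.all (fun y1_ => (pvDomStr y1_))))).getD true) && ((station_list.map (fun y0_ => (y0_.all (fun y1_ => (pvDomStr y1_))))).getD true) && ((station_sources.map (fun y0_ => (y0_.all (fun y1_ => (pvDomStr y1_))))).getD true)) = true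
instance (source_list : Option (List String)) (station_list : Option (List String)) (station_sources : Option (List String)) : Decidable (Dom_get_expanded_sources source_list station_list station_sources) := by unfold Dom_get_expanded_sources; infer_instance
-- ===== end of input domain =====

-- B re-implements A as split-on-'Stations' followed by a join with station_list as separator (alternative decomposition, same cost).


-- ===== PORT A =====
-- A: one forward loop over (source_list or []) carrying (expanded, has_stations) as state.
def get_expanded_sources (source_list : Option (List String)) (station_list : Option (List String)) (station_sources : Option (List String)) : List String × Bool :=
  (source_list.getD []).foldl
    (fun st src =>
      if src = "Stations" then (st.1 ++ station_list.getD [], true)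
      else (st.1 ++ [src], st.2))
    ([], false)

-- ===== PORT B =====
-- B: phase 1 splits the sources into segments at each 'Stations' marker (a marker opens a
-- new segment, anything else is appended to the last segment); phase 2 joins the segments
-- with station_list as separator; has_stations is derived from the segment count.
def get_expanded_sources_alt (source_list : Option (List String)) (station_list : Option (List String)) (station_sources : Option (List String)) : List String × Bool :=
  let segments := (source_list.getD []).foldl
    (fun segs s =>
      if s = "Stations" then segs ++ [[]]
      else segs.dropLast ++ [segs.getLastD [] ++ [s]])
    [[]]
  let expanded := segments.tail.foldl
    (fun acc seg => acc ++ station_list.getD [] ++ seg) (segments.headD [])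
  (expanded, decide (1 < segments.length))

-- ===== PRECONDITION & SPEC =====
def Spec_get_expanded_sources (source_list : Option (List String)) (station_list : Option (List String)) (station_sources : Option (List String)) (out : List String × Bool) : Prop := out = get_expanded_sources_alt source_list station_list station_sources
instance (source_list : Option (List String)) (station_list : Option (List String)) (station_sources : Option (List String)) (out : List String × Bool) : Decidable (Spec_get_expanded_sources source_list station_list station_sources out) := by unfold Spec_get_expanded_sources; infer_instance

-- ===== CLAIM (what is proved, stated in full; the proofs are below) =====
def Claim_equal_get_expanded_sources : Prop := ∀ (source_list : Option (List String)) (station_list : Option (List String)) (station_sources : Option (List String)), Dom_get_expanded_sources source_list station_list station_sources → Spec_get_expanded_sources source_list station_list station_sources (get_expanded_sources source_list station_list station_sources)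

-- ===== LEMMAS AND PROOFS =====
-- jn stl segs: the value of B's join loop (ges_join_aux below ties it to the foldl).
def jn (stl : List String) (segs : List (List String)) : List String :=
  segs.headD [] ++ segs.tail.flatMap (fun seg => stl ++ seg)

-- A's loop invariant: the fold appends the marker-expansion of l and or-accumulates membership.
theorem ges_foldl_inv (stl : List String) (l : List String) (acc : List String) (b : Bool) :
    l.foldl
      (fun st src =>
        if src = "Stations" then (st.1 ++ stl, true)
        else (st.1 ++ [src], st.2))
      (acc, b)
    = (acc ++ l.flatMap (fun src => if src = "Stations" then stl else [src]),
       b || l.contains "Stations") := by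
  induction l generalizing acc b with
  | nil => simp
  | cons x xs ih =>
    by_cases hx : x = "Stations"
    · simp [List.foldl_cons, hx, ih, List.flatMap_cons]
    · simp [List.foldl_cons, hx, ih, List.flatMap_cons, Ne.symm hx]

-- B's join loop, run from an arbitrary accumulator, appends flatMap (stl ++ ·).
theorem ges_join_aux (stl : List String) (segs : List (List String)) (acc : List String) :
    segs.foldl (fun acc seg => acc ++ stl ++ seg) acc
    = acc ++ segs.flatMap (fun seg => stl ++ seg) := by
  induction segs generalizing acc with
  | nil => simp
  | cons s rest ih => simp [List.foldl_cons, ih, List.flatMap_def]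

theorem jn_cons (stl : List String) (h : List String) (M : List (List String)) (hM : M ≠ []) :
    jn stl (h :: M) = h ++ stl ++ jn stl M := by
  obtain ⟨c, r, rfl⟩ := List.exists_cons_of_ne_nil hM
  simp [jn, List.flatMap_cons]

-- Opening a new empty segment appends the separator to the join.
theorem jn_append_nil (stl : List String) (segs : List (List String)) (h : segs ≠ []) :
    jn stl (segs ++ [[]]) = jn stl segs ++ stl := by
  induction segs with
  | nil => exact absurd rfl h
  | cons a t ih =>
    cases t with
    | nil => simp [jn, List.flatMap_cons]
    | cons b u =>
      rw [List.cons_append, jn_cons stl a _ (by simp), ih (by simp),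
        jn_cons stl a _ (by simp)]
      simp

-- Appending an element to the last segment appends it to the join.
theorem jn_append_last (stl : List String) (x : String) (segs : List (List String)) (h : segs ≠ []) :
    jn stl (segs.dropLast ++ [segs.getLastD [] ++ [x]]) = jn stl segs ++ [x] := by
  induction segs with
  | nil => exact absurd rfl h
  | cons a t ih =>
    cases t with
    | nil => simp [jn]
    | cons b u =>
      have hne : (b :: u).dropLast ++ [(b :: u).getLastD [] ++ [x]] ≠ [] := by simp
      have hgl : (a :: b :: u).getLastD [] = (b :: u).getLastD [] := by
        simp [List.getLastD_cons]
      rw [show (a :: b :: u).dropLast = a :: (b :: u).dropLast from rfl, hgl,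
        List.cons_append, jn_cons stl a _ hne, ih (by simp), jn_cons stl a _ (by simp)]
      simp

-- B's split loop invariant: joining the segments appends the marker expansion, the segment
-- count grows by the number of markers, and the segment list stays nonempty.
theorem ges_split_inv (stl : List String) (l : List String) :
    ∀ segs : List (List String), segs ≠ [] →
      jn stl (l.foldl (fun segs s => if s = "Stations" then segs ++ [[]]
          else segs.dropLast ++ [segs.getLastD [] ++ [s]]) segs)
        = jn stl segs ++ l.flatMap (fun src => if src = "Stations" then stl else [src])
      ∧ (l.foldl (fun segs s => if s = "Stations" then segs ++ [[]]
          else segs.dropLast ++ [segs.getLastD [] ++ [s]]) segs).length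
        = segs.length + l.count "Stations"
      ∧ (l.foldl (fun segs s => if s = "Stations" then segs ++ [[]]
          else segs.dropLast ++ [segs.getLastD [] ++ [s]]) segs) ≠ [] := by
  induction l with
  | nil => intro segs h; simp [h]
  | cons x xs ih =>
    intro segs h
    by_cases hx : x = "Stations"
    · obtain ⟨h1, h2, h3⟩ := ih (segs ++ [[]]) (by simp)
      refine ⟨?_, ?_, ?_⟩
      · simp only [List.foldl_cons, hx, if_pos rfl, if_true, List.flatMap_cons]
        rw [h1, jn_append_nil stl segs h]
        simp
      · simp only [List.foldl_cons, hx, if_pos rfl, if_true]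
        rw [h2]
        simp [List.count_cons, hx]
        omega
      · simpa [List.foldl_cons, hx] using h3
    · obtain ⟨h1, h2, h3⟩ := ih (segs.dropLast ++ [segs.getLastD [] ++ [x]]) (by simp)
      have hlen : (segs.dropLast ++ [segs.getLastD [] ++ [x]]).length = segs.length := by
        have := List.length_pos_of_ne_nil h
        simp [List.length_dropLast]
        omega
      refine ⟨?_, ?_, ?_⟩
      · simp only [List.foldl_cons, if_neg hx, List.flatMap_cons, if_neg hx]
        rw [h1, jn_append_last stl x segs h]
        simp
      · simp only [List.foldl_cons, if_neg hx]
        rw [h2, hlen]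
        simp [List.count_cons, hx]
      · simpa [List.foldl_cons, hx] using h3

theorem jn_eq (stl : List String) (segs : List (List String)) :
    segs.headD [] ++ segs.tail.flatMap (fun seg => stl ++ seg) = jn stl segs := rfl

-- ===== VERDICT (by name: the statement is the Claim_ definition above) =====
theorem get_expanded_sources_spec : Claim_equal_get_expanded_sources := by
  intro source_list station_list station_sources _
  unfold Spec_get_expanded_sources get_expanded_sources get_expanded_sources_alt
  rw [ges_foldl_inv]
  obtain ⟨h1, h2, _⟩ := ges_split_inv (station_list.getD []) (source_list.getD []) [[]] (by simp)
  simp only [ges_join_aux, jn_eq]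
  rw [h1, h2]
  simp [jn]
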